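-- pv_equiv track=rewrite | github.com/h-c-h/AALG_15766_S08 | ejemplo.py | resta
-- ===== SOURCE A (Python) =====
-- def resta(arr, x) -> int:
--     if x == 0:
--         if arr[0] % 2 == 0:
--             return arr[0]
--         else:
--             return -arr[0]
--     else:
--         if arr[x] % 2 == 0:
--             return arr[x] + resta(arr, x - 1)
--         else:
--             return -arr[x] + resta(arr, x - 1)
-- ===== SOURCE B (Python) =====
-- def resta(arr, x) -> int:
--     total = 0
--     i = x
--     while i != 0:
--         a = arr[i]
--         total += a if a % 2 == 0 else -a
--         i -= 1
--     a0 = arr[0]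
--     return total + (a0 if a0 % 2 == 0 else -a0)
-- ===== Notes on version B (the rewrite author's own statement) =====
-- stated objective: alternative
-- what changed: Replaces A's non-tail recursion from index x down to 0 by an iterative while loop with an explicit accumulator, handling arr[0] after the loop; no recursion, constant stack.
import Mathlib
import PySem

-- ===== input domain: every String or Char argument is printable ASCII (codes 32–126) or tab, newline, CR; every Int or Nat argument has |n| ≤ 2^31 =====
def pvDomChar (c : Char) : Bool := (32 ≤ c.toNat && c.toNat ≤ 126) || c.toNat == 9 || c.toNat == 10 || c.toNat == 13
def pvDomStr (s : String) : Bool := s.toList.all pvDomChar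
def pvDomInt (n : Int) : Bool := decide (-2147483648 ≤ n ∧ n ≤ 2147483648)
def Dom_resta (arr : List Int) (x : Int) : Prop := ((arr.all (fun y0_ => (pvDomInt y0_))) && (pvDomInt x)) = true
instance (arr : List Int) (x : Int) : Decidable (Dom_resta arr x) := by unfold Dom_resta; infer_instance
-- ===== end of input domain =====

-- B replaces A's non-tail recursion by an iterative while loop with an accumulator (arr[0] added after the loop): no recursion, constant stack.

-- ===== PORT A =====
-- Literal port of A's recursion. Python raises IndexError wherever pyGet? is none
-- (and recurses past the list for x < 0 until it raises); those inputs are outside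
-- Pre_resta and the port returns 0 there only to be total.
def resta (arr : List Int) (x : Int) : Int :=
  if x = 0 then
    match PySem.List.pyGet? arr 0 with
    | some a0 => if PySem.Int.mod a0 2 = 0 then a0 else -a0
    | none => 0
  else
    match PySem.List.pyGet? arr x with
    | some ax =>
        if x < 0 then 0   -- Python keeps recursing here and eventually raises; outside Pre_
        else if PySem.Int.mod ax 2 = 0 then ax + resta arr (x - 1)
        else -ax + resta arr (x - 1)
    | none => 0
termination_by x.toNat
decreasing_by omega

-- ===== PORT B =====
-- port of Source B: 'total = 0; i = x; while i != 0: total += ±arr[i]; i -= 1; return total + ±arr[0]'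
-- as a tail-recursive loop over the state (i, total); the while body indexes arr[i] exactly as
-- the Python does (pyGet? none = IndexError, outside Pre_; the loop for i < 0 likewise only
-- stops where Python raises, the port returns 0 there to be total).
def restaLoop (arr : List Int) (i : Int) (total : Int) : Int :=
  if i = 0 then
    match PySem.List.pyGet? arr 0 with
    | some a0 => total + (if PySem.Int.mod a0 2 = 0 then a0 else -a0)
    | none => 0
  else
    match PySem.List.pyGet? arr i with
    | some a =>
        if i < 0 then 0
        else restaLoop arr (i - 1) (total + (if PySem.Int.mod a 2 = 0 then a else -a))
    | none => 0
termination_by i.toNat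
decreasing_by omega

def resta_alt (arr : List Int) (x : Int) : Int := restaLoop arr x 0

-- ===== PRECONDITION & SPEC =====
-- Pre_: exactly the inputs where A's recursion reaches the base case without an IndexError.
def Pre_resta (arr : List Int) (x : Int) : Prop := 0 ≤ x ∧ x < arr.length
instance (arr : List Int) (x : Int) : Decidable (Pre_resta arr x) := by unfold Pre_resta; infer_instance
def pvWitness_resta : List Int × Int := ([3, 4, 5], 2)

def Spec_resta (arr : List Int) (x : Int) (out : Int) : Prop := out = resta_alt arr x
instance (arr : List Int) (x : Int) (out : Int) : Decidable (Spec_resta arr x out) := by unfold Spec_resta; infer_instance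

-- ===== CLAIM (what is proved, stated in full; the proofs are below) =====
def Claim_equal_resta : Prop := ∀ (arr : List Int) (x : Int), Dom_resta arr x → Pre_resta arr x → Spec_resta arr x (resta arr x)

-- ===== LEMMAS AND PROOFS =====

-- on an in-range natural index, B's accumulator loop computes total plus A's recursive value
theorem restaLoop_eq (arr : List Int) (n : Nat) (h : n < arr.length) :
    ∀ total : Int, restaLoop arr (n : Int) total = total + resta arr (n : Int) := by
  induction n with
  | zero =>
      intro total
      obtain ⟨a, t, rfl⟩ : ∃ a t, arr = a :: t := by
        cases arr with
        | nil => simp at h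
        | cons a t => exact ⟨a, t, rfl⟩
      unfold restaLoop resta
      simp
  | succ n ih =>
      intro total
      have h' : n < arr.length := by omega
      have hget : PySem.List.pyGet? arr ((n + 1 : Nat) : Int) = some arr[n + 1] := by
        rw [PySem.List.pyGet?_natCast, List.getElem?_eq_getElem h]
      have hne : ¬ (((n + 1 : Nat) : Int) = 0) := by omega
      have hnlt : ¬ (((n + 1 : Nat) : Int) < 0) := by omega
      have hsub : ((n + 1 : Nat) : Int) - 1 = (n : Int) := by push_cast; ring
      unfold restaLoop
      rw [if_neg hne, hget]
      dsimp only
      rw [if_neg hnlt, hsub, ih h']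
      conv_rhs => unfold resta
      rw [if_neg hne, hget]
      dsimp only
      rw [if_neg hnlt, hsub]
      split_ifs with hp
      · ring
      · ring

-- ===== VERDICT (by name: the statement is the Claim_ definition above) =====
theorem resta_spec : Claim_equal_resta := by
  intro arr x _ hpre
  obtain ⟨hx0, hxl⟩ := hpre
  obtain ⟨n, rfl⟩ : ∃ n : Nat, x = (n : Int) := ⟨x.toNat, (Int.toNat_of_nonneg hx0).symm⟩
  have hn : n < arr.length := by exact_mod_cast hxl
  unfold Spec_resta resta_alt
  rw [restaLoop_eq arr n hn 0, zero_add]
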